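-- pv_equiv track=rewrite | github.com/evinaeva/ocr-localization-checker | shared/docx_section_extractor.py | _segment_by_blank_lines
-- ===== SOURCE A (Python) =====
-- from typing import List, Optional
--
-- def _is_subject_line(line: str) -> bool:
--     """Check if line is email Subject: metadata (should be excluded)."""
--     return line.lower().startswith("subject:")
--
-- def _segment_by_blank_lines(lines: List[str]) -> List[tuple[Optional[str], List[str]]]:
--     """
--     Fallback segmentation: split by 2+ consecutive blank lines.
--
--     Returns list of (None, content_lines) tuples (no headers).
--     """
--     sections = []
--     current_block = []
--     blank_count = 0
--
--     for line in lines: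
--         # Skip Subject: lines
--         if _is_subject_line(line):
--             continue
--
--         if not line.strip():
--             blank_count += 1
--         else:
--             if blank_count >= 2 and current_block:
--                 # End of block
--                 sections.append((None, current_block))
--                 current_block = []
--
--             current_block.append(line)
--             blank_count = 0
--
--     # Last block
--     if current_block:
--         sections.append((None, current_block))
--
--     return sections
-- ===== SOURCE B (Python) =====
-- from typing import List, Optional
--
-- def _segment_by_blank_lines(lines: List[str]) -> List[tuple[Optional[str], List[str]]]:
--     # Staged: filter out subject lines, then locate the content lines with their
--     # positions, then split purely by index-gap arithmetic (a gap of >= 3 between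
--     # consecutive content positions means >= 2 blank lines in between).
--     kept = [l for l in lines if not l.lower().startswith("subject:")]
--     content = [(i, l) for i, l in enumerate(kept) if l.strip()]
--     blocks = []
--     prev = None
--     for i, l in content:
--         if prev is not None and i - prev <= 2:
--             blocks[-1].append(l)
--         else:
--             blocks.append([l])
--         prev = i
--     return [(None, b) for b in blocks]
-- ===== Notes on version B (the rewrite author's own statement) =====
-- stated objective: alternative
-- what changed: Instead of A's single stateful scan with a running blank counter and conditional block flushing, B works in stages: filter out subject lines, enumerate the remaining lines and keep only the content lines with their positions, then build the blocks by pure index-gap arithmetic (start a new block exactly when the position gap to the previous content line is >= 3, i.e. >= 2 blanks in between).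
import Mathlib
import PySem

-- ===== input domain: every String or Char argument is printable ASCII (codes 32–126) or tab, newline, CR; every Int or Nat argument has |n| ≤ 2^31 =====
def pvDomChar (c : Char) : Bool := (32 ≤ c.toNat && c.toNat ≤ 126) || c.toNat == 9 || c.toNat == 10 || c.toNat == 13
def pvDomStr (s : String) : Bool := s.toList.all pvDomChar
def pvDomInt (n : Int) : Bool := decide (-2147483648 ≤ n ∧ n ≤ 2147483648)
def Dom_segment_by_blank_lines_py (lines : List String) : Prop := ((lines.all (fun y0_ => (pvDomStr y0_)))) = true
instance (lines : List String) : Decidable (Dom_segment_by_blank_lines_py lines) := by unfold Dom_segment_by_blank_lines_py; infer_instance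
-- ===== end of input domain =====

-- B replaces A's single stateful scan (running blank counter, conditional flush) by staged
-- passes: filter subject lines, enumerate and keep content lines with their positions, then
-- build blocks by index-gap arithmetic (objective: alternative).

-- ===== PORT A =====
-- _is_subject_line
def pvIsSubject (line : String) : Bool :=
  PySem.Str.startswith (PySem.Str.lower line) "subject:"

-- the for-loop of A, state = (sections, current_block, blank_count); [] case = the code after the loop
def pvLoopA : List String → List (Option String × List String) → List String → Nat → List (Option String × List String)
  | [], sections, current_block, _ =>
      if current_block ≠ [] then sections ++ [(none, current_block)] else sections
  | line :: rest, sections, current_block, blank_count =>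
      if pvIsSubject line then pvLoopA rest sections current_block blank_count
      else if PySem.Str.strip line == "" then pvLoopA rest sections current_block (blank_count + 1)
      else if blank_count ≥ 2 ∧ current_block ≠ [] then
        pvLoopA rest (sections ++ [(none, current_block)]) [line] 0
      else pvLoopA rest sections (current_block ++ [line]) 0

def segment_by_blank_lines_py (lines : List String) : List (Option String × List String) :=
  pvLoopA lines [] [] 0

-- ===== PORT B =====
-- not l.strip()
def pvIsBlank (l : String) : Bool := PySem.Str.strip l == ""

-- blocks[-1].append(x)
def pvAppendLast : List (List String) → String → List (List String)
  | [], _ => []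
  | [b], x => [b ++ [x]]
  | b :: bs, x => b :: pvAppendLast bs x

-- the for-loop of B over the (position, line) content list, state = (blocks, prev)
def pvLoopB : List (Int × String) → Option Int → List (List String) → List (List String)
  | [], _, blocks => blocks
  | (i, l) :: rest, prev, blocks =>
      pvLoopB rest (some i)
        (match prev with
         | some p => if i - p ≤ 2 then pvAppendLast blocks l else blocks ++ [[l]]
         | none => blocks ++ [[l]])

def segment_by_blank_lines_py_alt (lines : List String) : List (Option String × List String) :=
  let kept := lines.filter (fun l => !pvIsSubject l)
  let content := (PySem.List.enumerate kept).filter (fun p => !pvIsBlank p.2)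
  (pvLoopB content none []).map (fun b => ((none : Option String), b))

-- ===== PRECONDITION & SPEC =====
def Spec_segment_by_blank_lines_py (lines : List String) (out : List (Option String × List String)) : Prop := out = segment_by_blank_lines_py_alt lines
instance (lines : List String) (out : List (Option String × List String)) : Decidable (Spec_segment_by_blank_lines_py lines out) := by unfold Spec_segment_by_blank_lines_py; infer_instance

-- ===== CLAIM (what is proved, stated in full; the proofs are below) =====
def Claim_equal_segment_by_blank_lines_py : Prop := ∀ (lines : List String), Dom_segment_by_blank_lines_py lines → Spec_segment_by_blank_lines_py lines (segment_by_blank_lines_py lines)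

-- ===== LEMMAS AND PROOFS =====

-- proof-side view of B's content list, enumerated from an arbitrary start
def pvContentFrom (n : Int) (kept : List String) : List (Int × String) :=
  (PySem.List.enumerate kept n).filter (fun p => !pvIsBlank p.2)

def pvWrap (b : List String) : Option String × List String := (none, b)

-- skipping subject lines in the loop = filtering them out beforehand
theorem pvLoopA_filter (ls : List String) (secs : List (Option String × List String))
    (cur : List String) (bc : Nat) :
    pvLoopA ls secs cur bc = pvLoopA (ls.filter (fun l => !pvIsSubject l)) secs cur bc := by
  induction ls generalizing secs cur bc with
  | nil => rfl
  | cons x xs ih =>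
    by_cases hs : pvIsSubject x = true
    · simp [pvLoopA, hs, ih]
    · simp only [Bool.not_eq_true] at hs
      by_cases hb : PySem.Str.strip x == ""
      · simp [pvLoopA, hs, hb, ih]
      · simp only [pvLoopA, hs, hb, List.filter_cons, Bool.not_false, if_true,
          Bool.false_eq_true, if_false]
        split <;> exact ih _ _ _

-- appending to the last block of a non-empty block list
theorem pvAppendLast_snoc (s : List (List String)) (c : List String) (x : String) :
    pvAppendLast (s ++ [c]) x = s ++ [c ++ [x]] := by
  induction s with
  | nil => rfl
  | cons a s' ih =>
    obtain ⟨y, ys, hy⟩ : ∃ y ys, s' ++ [c] = y :: ys := by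
      cases s' <;> exact ⟨_, _, rfl⟩
    rw [List.cons_append, hy]
    rw [show pvAppendLast (a :: y :: ys) x = a :: pvAppendLast (y :: ys) x from rfl, ← hy, ih]
    simp

-- in-block invariant: A with a non-empty current block and blank_count bc since the content
-- line at position p (so the next position is n = p + 1 + bc) = B with prev = p and the
-- current block sitting last in the block list
theorem pvLoopA_eq_loopB_inblock (rest : List String) (n : Int)
    (s : List (List String)) (cur : List String) (p : Int) (bc : Nat)
    (hsf : ∀ l ∈ rest, pvIsSubject l = false) (hc : cur ≠ [])
    (hn : n = p + 1 + bc) :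
    pvLoopA rest (s.map pvWrap) cur bc
      = (pvLoopB (pvContentFrom n rest) (some p) (s ++ [cur])).map pvWrap := by
  induction rest generalizing n s cur p bc with
  | nil => simp [pvLoopA, pvContentFrom, PySem.List.enumerate_nil, pvLoopB, hc, pvWrap]
  | cons x xs ih =>
    have hs := hsf x (by simp)
    have hsf' : ∀ l ∈ xs, pvIsSubject l = false := fun l hl => hsf l (by simp [hl])
    have hcf : pvContentFrom n (x :: xs)
        = if pvIsBlank x then pvContentFrom (n + 1) xs
          else (n, x) :: pvContentFrom (n + 1) xs := by
      by_cases hbx : pvIsBlank x = true <;>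
        simp [pvContentFrom, PySem.List.enumerate_cons, hbx]
    by_cases hb : pvIsBlank x = true
    · have hb' : (PySem.Str.strip x == "") = true := hb
      simp only [pvLoopA, hs, hb', Bool.false_eq_true, if_false, if_true, hcf, hb, if_true]
      exact ih (n + 1) s cur p (bc + 1) hsf' hc (by push_cast; omega)
    · simp only [Bool.not_eq_true] at hb
      have hb' : (PySem.Str.strip x == "") = false := hb
      simp only [pvLoopA, hs, hb', Bool.false_eq_true, if_false, hcf, hb]
      by_cases h2 : 2 ≤ bc
      · rw [if_pos ⟨h2, hc⟩]
        have hgap : ¬ (n - p ≤ 2) := by omega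
        simp only [pvLoopB, hgap, if_false]
        have : (s.map pvWrap) ++ [(none, cur)] = ((s ++ [cur]).map pvWrap) := by
          simp [pvWrap]
        rw [this, ih (n + 1) (s ++ [cur]) [x] n 0 hsf' (by simp) (by push_cast; omega)]
      · rw [if_neg (by rintro ⟨h, -⟩; omega)]
        have hgap : n - p ≤ 2 := by omega
        simp only [pvLoopB, hgap, if_true, pvAppendLast_snoc]
        exact ih (n + 1) s (cur ++ [x]) n 0 hsf' (by simp) (by push_cast; omega)

-- before the first content line: empty current block, prev = None
theorem pvLoopA_eq_loopB_start (rest : List String) (n : Int)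
    (s : List (List String)) (bc : Nat)
    (hsf : ∀ l ∈ rest, pvIsSubject l = false) :
    pvLoopA rest (s.map pvWrap) [] bc
      = (pvLoopB (pvContentFrom n rest) none s).map pvWrap := by
  induction rest generalizing n bc with
  | nil => simp [pvLoopA, pvContentFrom, PySem.List.enumerate_nil, pvLoopB]
  | cons x xs ih =>
    have hs := hsf x (by simp)
    have hsf' : ∀ l ∈ xs, pvIsSubject l = false := fun l hl => hsf l (by simp [hl])
    have hcf : pvContentFrom n (x :: xs)
        = if pvIsBlank x then pvContentFrom (n + 1) xs
          else (n, x) :: pvContentFrom (n + 1) xs := by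
      by_cases hbx : pvIsBlank x = true <;>
        simp [pvContentFrom, PySem.List.enumerate_cons, hbx]
    by_cases hb : pvIsBlank x = true
    · have hb' : (PySem.Str.strip x == "") = true := hb
      simp only [pvLoopA, hs, hb', Bool.false_eq_true, if_false, if_true, hcf, hb, if_true]
      exact ih (n + 1) (bc + 1) hsf'
    · simp only [Bool.not_eq_true] at hb
      have hb' : (PySem.Str.strip x == "") = false := hb
      simp only [pvLoopA, hs, hb', Bool.false_eq_true, if_false, hcf, hb]
      rw [if_neg (by rintro ⟨-, h⟩; exact h rfl)]
      simp only [pvLoopB]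
      exact pvLoopA_eq_loopB_inblock xs (n + 1) s [x] n 0 hsf' (by simp) (by omega)

-- ===== VERDICT (by name: the statement is the Claim_ definition above) =====
theorem segment_by_blank_lines_py_spec : Claim_equal_segment_by_blank_lines_py := by
  intro lines _
  show segment_by_blank_lines_py lines = segment_by_blank_lines_py_alt lines
  rw [segment_by_blank_lines_py, segment_by_blank_lines_py_alt, pvLoopA_filter]
  have h := pvLoopA_eq_loopB_start (lines.filter (fun l => !pvIsSubject l)) 0 [] 0
    (by intro l hl; simpa using (List.mem_filter.1 hl).2)
  simpa [pvContentFrom, pvWrap] using h
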